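-- pv_equiv track=rewrite | github.com/Sur818/Coding-Projects | python programming/file handling/binfile 8 using function.py | longest_uniqueword
-- ===== SOURCE A (Python) =====
-- def longest_uniqueword(a):
-- 	temp=0
-- 	ans=""
-- 	for x in a.split(' '):
-- 		if len(x)==len(set(x)):
-- 			if len(x)>temp:
-- 				ans=x
-- 				temp=max(temp,len(x))
-- 	return ans
-- ===== SOURCE B (Python) =====
-- def longest_uniqueword(a):
--     for w in sorted(a.split(' '), key=len, reverse=True):
--         if len(w) == len(set(w)):
--             return w
--     return ""
-- ===== Notes on version B (the rewrite author's own statement) =====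
-- stated objective: alternative
-- what changed: Replaces the single-pass running-maximum scan (temp/ans accumulator with strict-greater updates) by a sort-then-scan strategy: stable-sort the words by length descending and return the first word whose characters are all distinct.
import Mathlib
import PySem

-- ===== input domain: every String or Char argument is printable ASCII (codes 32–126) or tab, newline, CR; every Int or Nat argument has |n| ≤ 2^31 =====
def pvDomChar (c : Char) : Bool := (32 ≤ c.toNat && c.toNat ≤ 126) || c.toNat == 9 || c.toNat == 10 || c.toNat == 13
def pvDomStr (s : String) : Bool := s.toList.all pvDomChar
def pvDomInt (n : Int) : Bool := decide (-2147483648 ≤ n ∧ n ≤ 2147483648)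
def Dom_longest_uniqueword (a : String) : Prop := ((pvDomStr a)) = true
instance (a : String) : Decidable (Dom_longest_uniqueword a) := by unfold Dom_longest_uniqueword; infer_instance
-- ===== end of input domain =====

-- B replaces A's running-maximum scan by a stable descending sort by length followed by a
-- first-match scan for a word with all-distinct characters; same return value, no speed claim.

-- ===== PORT A =====
-- literal port of A: fold over a.split(' ') carrying the (temp, ans) pair
def longest_uniqueword (a : String) : String :=
  (((PySem.Str.split? a " ").getD []).foldl
    (fun (st : Int × String) x =>
      if PySem.Str.len x = PySem.Set.len (PySem.Set.ofList x.toList) then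
        if PySem.Str.len x > st.1 then (max st.1 (PySem.Str.len x), x) else st
      else st)
    (0, "")).2

-- ===== PORT B =====
-- B's loop 'for w in sorted(a.split(' '), key=len, reverse=True): if len(w)==len(set(w)): return w' / 'return ""'
def firstUniqueWord : List String → String
  | [] => ""
  | w :: t => if PySem.Str.len w = PySem.Set.len (PySem.Set.ofList w.toList) then w
              else firstUniqueWord t

def longest_uniqueword_alt (a : String) : String :=
  firstUniqueWord (PySem.List.sorted ((PySem.Str.split? a " ").getD []) PySem.Str.len true)

-- ===== PRECONDITION & SPEC =====
def Spec_longest_uniqueword (a : String) (out : String) : Prop := out = longest_uniqueword_alt a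
instance (a : String) (out : String) : Decidable (Spec_longest_uniqueword a out) := by unfold Spec_longest_uniqueword; infer_instance

-- ===== CLAIM (what is proved, stated in full; the proofs are below) =====
def Claim_equal_longest_uniqueword : Prop := ∀ (a : String), Dom_longest_uniqueword a → Spec_longest_uniqueword a (longest_uniqueword a)

-- ===== LEMMAS AND PROOFS =====

-- 'x has all-distinct characters' test shared by both ports
abbrev uq (x : String) : Prop := PySem.Str.len x = PySem.Set.len (PySem.Set.ofList x.toList)

-- A's loop body, named
def gA (st : Int × String) (x : String) : Int × String :=
  if PySem.Str.len x = PySem.Set.len (PySem.Set.ofList x.toList) then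
    if PySem.Str.len x > st.1 then (max st.1 (PySem.Str.len x), x) else st
  else st

-- A's update collapsed to a single-value accumulator
def stepA (ans x : String) : String :=
  if uq x ∧ PySem.Str.len ans < PySem.Str.len x then x else ans

lemma len_nonneg (x : String) : 0 ≤ PySem.Str.len x := by
  simp [PySem.Str.len_eq]

lemma len_empty : PySem.Str.len "" = 0 := by decide

lemma eq_empty_of_len_le_zero (x : String) (h : PySem.Str.len x ≤ 0) : x = "" := by
  have h0 : x.toList.length = 0 := by
    have := PySem.Str.len_eq x; omega
  exact String.toList_eq_nil_iff.mp (List.length_eq_zero_iff.mp h0)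

lemma fUW_nil : firstUniqueWord [] = "" := rfl

lemma fUW_cons_pos {w : String} {t : List String} (h : uq w) :
    firstUniqueWord (w :: t) = w := by
  rw [firstUniqueWord, if_pos h]

lemma fUW_cons_neg {w : String} {t : List String} (h : ¬ uq w) :
    firstUniqueWord (w :: t) = firstUniqueWord t := by
  rw [firstUniqueWord, if_neg h]

lemma insertBy_nil {α : Type} (before : α → α → Bool) (x : α) :
    PySem.List.insertBy before x [] = [x] := rfl

lemma insertBy_cons_pos {α : Type} (before : α → α → Bool) (x y : α) (ys : List α)
    (h : before x y = true) :
    PySem.List.insertBy before x (y :: ys) = x :: y :: ys := by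
  rw [PySem.List.insertBy, if_pos h]

lemma insertBy_cons_neg {α : Type} (before : α → α → Bool) (x y : α) (ys : List α)
    (h : ¬ before x y = true) :
    PySem.List.insertBy before x (y :: ys) = y :: PySem.List.insertBy before x ys := by
  rw [PySem.List.insertBy, if_neg h]

-- A's pair fold equals the collapsed fold (invariant: temp = len ans)
lemma foldA_eq (ws : List String) : ∀ (ans : String),
    (ws.foldl gA (PySem.Str.len ans, ans)).2 = ws.foldl stepA ans := by
  induction ws with
  | nil => intro ans; rfl
  | cons x t ih =>
    intro ans
    rw [List.foldl_cons, List.foldl_cons]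
    by_cases hu : uq x
    · by_cases hl : PySem.Str.len ans < PySem.Str.len x
      · have h1 : gA (PySem.Str.len ans, ans) x = (PySem.Str.len x, x) := by
          simp only [gA]
          rw [if_pos hu, if_pos (show PySem.Str.len x > (PySem.Str.len ans, ans).1 from hl),
              show max (PySem.Str.len ans, ans).1 (PySem.Str.len x) = PySem.Str.len x from max_eq_right (le_of_lt hl)]
        have h2 : stepA ans x = x := by unfold stepA; rw [if_pos ⟨hu, hl⟩]
        rw [h1, h2]; exact ih x
      · have h1 : gA (PySem.Str.len ans, ans) x = (PySem.Str.len ans, ans) := by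
          simp only [gA]
          rw [if_pos hu, if_neg (show ¬ PySem.Str.len x > (PySem.Str.len ans, ans).1 from hl)]
        have h2 : stepA ans x = ans := by unfold stepA; rw [if_neg (by tauto)]
        rw [h1, h2]; exact ih ans
    · have h1 : gA (PySem.Str.len ans, ans) x = (PySem.Str.len ans, ans) := by
        simp only [gA]; rw [if_neg hu]
      have h2 : stepA ans x = ans := by unfold stepA; rw [if_neg (by tauto)]
      rw [h1, h2]; exact ih ans

lemma firstUniqueWord_mem_or_empty (s : List String) :
    firstUniqueWord s = "" ∨ firstUniqueWord s ∈ s := by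
  induction s with
  | nil => left; rfl
  | cons w t ih =>
    by_cases h : uq w
    · right; rw [fUW_cons_pos h]; exact List.mem_cons_self
    · rw [fUW_cons_neg h]
      rcases ih with h' | h'
      · left; exact h'
      · right; exact List.mem_cons_of_mem _ h'

-- key lemma: inserting x into a length-descending list commutes with A's step
lemma firstUnique_insert (x : String) (s : List String)
    (hs : s.Pairwise (fun a b => PySem.Str.len b ≤ PySem.Str.len a)) :
    firstUniqueWord (PySem.List.insertBy (fun a b => decide (PySem.Str.len b < PySem.Str.len a)) x s)
      = stepA (firstUniqueWord s) x := by
  induction s with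
  | nil =>
    rw [insertBy_nil, fUW_nil]
    by_cases hu : uq x
    · by_cases hl : PySem.Str.len "" < PySem.Str.len x
      · rw [fUW_cons_pos hu]; unfold stepA; rw [if_pos ⟨hu, hl⟩]
      · have hx : x = "" := eq_empty_of_len_le_zero x (by rw [len_empty] at hl; omega)
        subst hx
        rw [fUW_cons_pos hu]; unfold stepA; rw [if_neg (by tauto)]
    · rw [fUW_cons_neg hu, fUW_nil]; unfold stepA; rw [if_neg (by tauto)]
  | cons y t ih =>
    have hyt : ∀ e ∈ t, PySem.Str.len e ≤ PySem.Str.len y := (List.pairwise_cons.mp hs).1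
    have ht : t.Pairwise (fun a b => PySem.Str.len b ≤ PySem.Str.len a) := (List.pairwise_cons.mp hs).2
    by_cases hb : PySem.Str.len y < PySem.Str.len x
    · -- x is inserted in front of y
      rw [insertBy_cons_pos _ _ _ _ (by simpa using hb)]
      have hlt : PySem.Str.len (firstUniqueWord (y :: t)) < PySem.Str.len x := by
        rcases firstUniqueWord_mem_or_empty (y :: t) with h' | h'
        · rw [h', len_empty]; have := len_nonneg y; omega
        · rcases List.mem_cons.mp h' with h'' | h''
          · rw [h'']; exact hb
          · have := hyt _ h''; omega
      by_cases hu : uq x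
      · rw [fUW_cons_pos hu]; unfold stepA; rw [if_pos ⟨hu, hlt⟩]
      · rw [fUW_cons_neg hu]; unfold stepA; rw [if_neg (by tauto)]
    · -- x goes after y
      rw [insertBy_cons_neg _ _ _ _ (by simpa using hb)]
      by_cases hy : uq y
      · rw [fUW_cons_pos hy, fUW_cons_pos hy]; unfold stepA
        rw [if_neg (by rintro ⟨-, hlen⟩; omega)]
      · rw [fUW_cons_neg hy, fUW_cons_neg hy]
        exact ih ht

-- main bridge: first unique word of the descending sort = A's left fold
lemma sorted_firstUnique_eq_fold (ws : List String) :
    firstUniqueWord (PySem.List.sorted ws PySem.Str.len true) = ws.foldl stepA "" := by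
  induction ws using List.reverseRecOn with
  | nil => rfl
  | append_singleton t x ih =>
    rw [PySem.List.sorted_rev_eq_foldl_insertBy, List.foldl_append, List.foldl_cons, List.foldl_nil,
        ← PySem.List.sorted_rev_eq_foldl_insertBy]
    rw [firstUnique_insert x _ (PySem.List.sorted_pairwise_rev t PySem.Str.len)]
    rw [ih, List.foldl_append, List.foldl_cons, List.foldl_nil]

-- ===== VERDICT (by name: the statement is the Claim_ definition above) =====
theorem longest_uniqueword_spec : Claim_equal_longest_uniqueword := by
  intro a _
  show longest_uniqueword a = longest_uniqueword_alt a
  unfold longest_uniqueword longest_uniqueword_alt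
  rw [sorted_firstUnique_eq_fold]
  have := foldA_eq ((PySem.Str.split? a " ").getD []) ""
  rw [len_empty] at this
  exact this
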